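-- pv_equiv track=rewrite | github.com/aviswerdlow/k4 | 04_EXPERIMENTS/phase3_zone/key_fit/fit_homophonic_from_anchors.py | extract_non_anchor_text
-- ===== SOURCE A (Python) =====
-- ANCHORS = {
--     "EAST": (21, 24),
--     "NORTHEAST": (25, 33),
--     "BERLIN": (63, 68),
--     "CLOCK": (69, 73)
-- }
--
-- def extract_non_anchor_text(text: str) -> str:
--     """Extract text outside anchor positions"""
--     locked_positions = set()
--     for anchor, (start, end) in ANCHORS.items():
--         for i in range(start, end + 1):
--             locked_positions.add(i)
--
--     non_anchor = []
--     for i, char in enumerate(text):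
--         if i not in locked_positions:
--             non_anchor.append(char)
--
--     return ''.join(non_anchor)
-- ===== SOURCE B (Python) =====
-- ANCHORS = {
--     "EAST": (21, 24),
--     "NORTHEAST": (25, 33),
--     "BERLIN": (63, 68),
--     "CLOCK": (69, 73)
-- }
--
-- def extract_non_anchor_text(text: str) -> str:
--     """Extract text outside anchor positions"""
--     # merge the anchor ranges into disjoint half-open intervals [start, end+1)
--     merged = []
--     for start, end in sorted(ANCHORS.values()):
--         if merged and start <= merged[-1][1]:
--             merged[-1] = (merged[-1][0], max(merged[-1][1], end + 1))
--         else: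
--             merged.append((start, end + 1))
--     # concatenate the gaps between consecutive merged intervals
--     pieces = []
--     prev = 0
--     for start, stop in merged:
--         pieces.append(text[prev:start])
--         prev = stop
--     pieces.append(text[prev:])
--     return ''.join(pieces)
-- ===== Notes on version B (the rewrite author's own statement) =====
-- stated objective: alternative
-- what changed: Instead of building a set of locked indices and testing each character's index against it, B merges the sorted anchor ranges into disjoint half-open intervals and concatenates the text slices in the gaps between them.
import Mathlib
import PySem

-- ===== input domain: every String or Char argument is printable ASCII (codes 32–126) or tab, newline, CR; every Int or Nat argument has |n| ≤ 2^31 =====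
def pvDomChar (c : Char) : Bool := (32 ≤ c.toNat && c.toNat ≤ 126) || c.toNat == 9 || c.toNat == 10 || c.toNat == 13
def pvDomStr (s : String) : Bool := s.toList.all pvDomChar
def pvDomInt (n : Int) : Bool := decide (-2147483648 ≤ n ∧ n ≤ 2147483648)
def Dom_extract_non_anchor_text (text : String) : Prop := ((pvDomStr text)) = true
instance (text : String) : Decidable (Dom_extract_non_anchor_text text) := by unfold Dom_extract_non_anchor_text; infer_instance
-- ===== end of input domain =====

-- B replaces A's per-character membership test against a set of locked indices by merging
-- the anchor ranges into disjoint intervals and concatenating the gap slices (objective: alternative decomposition).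

def pvANCHORS : PySem.Dict String (Int × Int) :=
  PySem.Dict.ofList [("EAST", (21, 24)), ("NORTHEAST", (25, 33)), ("BERLIN", (63, 68)), ("CLOCK", (69, 73))]

-- ===== PORT A =====
def extract_non_anchor_text (text : String) : String :=
  let locked : PySem.Set Int :=
    pvANCHORS.items.foldl
      (fun s p => (PySem.List.pyRange p.2.1 (p.2.2 + 1) 1).foldl (fun s i => PySem.Set.add s i) s)
      PySem.Set.empty
  let non_anchor : List Char :=
    (text.toList.foldl
      (fun (st : List Char × Int) char =>
        (if ¬ (PySem.Set.contains locked st.2 = true) then st.1 ++ [char] else st.1, st.2 + 1))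
      ([], 0)).1
  String.ofList (PySem.Chars.join [] (non_anchor.map (fun c => [c])))

-- ===== PORT B =====
def extract_non_anchor_text_alt (text : String) : String :=
  let merged : List (Int × Int) :=
    (PySem.List.sorted2 pvANCHORS.values (fun v => v.1) (fun v => v.2)).foldl
      (fun m se =>
        match m.getLast? with
        | some last =>
            if se.1 ≤ last.2 then m.dropLast ++ [(last.1, max last.2 (se.2 + 1))]
            else m ++ [(se.1, se.2 + 1)]
        | none => m ++ [(se.1, se.2 + 1)])
      []
  let st : List (List Char) × Int :=
    merged.foldl
      (fun st iv => (st.1 ++ [PySem.Chars.slice text.toList (some st.2) (some iv.1)], iv.2))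
      ([], 0)
  let pieces : List (List Char) := st.1 ++ [PySem.Chars.slice text.toList (some st.2) none]
  String.ofList (PySem.Chars.join [] pieces)

-- ===== PRECONDITION & SPEC =====
def Spec_extract_non_anchor_text (text : String) (out : String) : Prop := out = extract_non_anchor_text_alt text
instance (text : String) (out : String) : Decidable (Spec_extract_non_anchor_text text out) := by unfold Spec_extract_non_anchor_text; infer_instance

-- ===== CLAIM (what is proved, stated in full; the proofs are below) =====
def Claim_equal_extract_non_anchor_text : Prop := ∀ (text : String), Dom_extract_non_anchor_text text → Spec_extract_non_anchor_text text (extract_non_anchor_text text)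

-- ===== LEMMAS AND PROOFS =====

-- A's locked-position set, evaluated once: membership is exactly the two anchor index ranges
lemma pvLocked_contains (i : Int) :
    PySem.Set.contains
      (pvANCHORS.items.foldl
        (fun s p => (PySem.List.pyRange p.2.1 (p.2.2 + 1) 1).foldl (fun s i => PySem.Set.add s i) s)
        PySem.Set.empty) i
      = decide ((21 ≤ i ∧ i ≤ 33) ∨ (63 ≤ i ∧ i ≤ 73)) := by
  have h : (pvANCHORS.items.foldl
        (fun s p => (PySem.List.pyRange p.2.1 (p.2.2 + 1) 1).foldl (fun s i => PySem.Set.add s i) s)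
        (PySem.Set.empty : PySem.Set Int))
      = [21,22,23,24,25,26,27,28,29,30,31,32,33,63,64,65,66,67,68,69,70,71,72,73] := by decide
  rw [h]
  simp only [PySem.Set.contains, List.contains_eq_mem, decide_eq_decide, List.mem_cons,
    List.not_mem_nil, or_false]
  omega

-- the indexed-accumulator loop is the filtered enumeration
lemma pvFold (q : Int → Bool) (l : List Char) (k : Int) (acc : List Char) :
    (l.foldl
        (fun (st : List Char × Int) c => (if ¬ (q st.2 = true) then st.1 ++ [c] else st.1, st.2 + 1))
        (acc, k)).1
      = acc ++ ((PySem.List.enumerate l k).filter (fun ic => !(q ic.1))).map (·.2) := by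
  induction l generalizing k acc with
  | nil => simp [PySem.List.enumerate]
  | cons c t ih =>
    rw [List.foldl_cons, PySem.List.enumerate_cons, List.filter_cons]
    by_cases h : q k = true
    · rw [if_neg (by simp [h]), ih]
      simp [h]
    · rw [if_pos (by simp [h]), ih]
      simp [h]

-- the core fact: filtering the enumeration by "index outside both ranges" is the three gap slices
lemma pvCore (l : List Char) (k : Nat) :
    ((PySem.List.enumerate l (k : Int)).filter
        (fun ic => decide (¬ ((21 ≤ ic.1 ∧ ic.1 ≤ 33) ∨ (63 ≤ ic.1 ∧ ic.1 ≤ 73))))).map (·.2)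
      = l.take (21 - k) ++ ((l.drop (34 - k)).take (29 - (k - 34))) ++ l.drop (74 - k) := by
  induction l generalizing k with
  | nil => simp [PySem.List.enumerate]
  | cons a t ih =>
    rw [PySem.List.enumerate_cons]
    have hk1 : ((k : Int) + 1) = ((k + 1 : Nat) : Int) := by push_cast; ring
    rw [List.filter_cons]
    by_cases h1 : k < 21
    · have hc : (decide (¬ ((21 ≤ ((k:Int),a).1 ∧ ((k:Int),a).1 ≤ 33) ∨ (63 ≤ ((k:Int),a).1 ∧ ((k:Int),a).1 ≤ 73)))) = true := by
        simp; omega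
      have e1 : 21 - k = (20 - k) + 1 := by omega
      have e2 : 34 - k = (33 - k) + 1 := by omega
      have e3 : 74 - k = (73 - k) + 1 := by omega
      have e4 : 21 - (k + 1) = 20 - k := by omega
      have e5 : 34 - (k + 1) = 33 - k := by omega
      have e6 : 74 - (k + 1) = 73 - k := by omega
      have e7 : 29 - ((k + 1) - 34) = 29 - (k - 34) := by omega
      rw [hc, if_pos rfl]
      simp only [List.map_cons]
      rw [hk1, ih, e1, e2, e3, e4, e5, e6, e7, List.take_succ_cons, List.drop_succ_cons,
        List.drop_succ_cons]
      simp
    · by_cases h2 : k < 34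
      · have hc : (decide (¬ ((21 ≤ ((k:Int),a).1 ∧ ((k:Int),a).1 ≤ 33) ∨ (63 ≤ ((k:Int),a).1 ∧ ((k:Int),a).1 ≤ 73)))) = false := by
          simp; omega
        have e1 : 21 - k = 0 := by omega
        have e2 : 21 - (k + 1) = 0 := by omega
        have e3 : 34 - k = (33 - k) + 1 := by omega
        have e4 : 74 - k = (73 - k) + 1 := by omega
        have e5 : 34 - (k + 1) = 33 - k := by omega
        have e6 : 74 - (k + 1) = 73 - k := by omega
        have e7 : 29 - ((k + 1) - 34) = 29 - (k - 34) := by omega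
        rw [hc, if_neg (by simp)]
        rw [hk1, ih, e1, e2, e3, e4, e5, e6, e7, List.drop_succ_cons, List.drop_succ_cons]
        simp
      · by_cases h3 : k < 63
        · have hc : (decide (¬ ((21 ≤ ((k:Int),a).1 ∧ ((k:Int),a).1 ≤ 33) ∨ (63 ≤ ((k:Int),a).1 ∧ ((k:Int),a).1 ≤ 73)))) = true := by
            simp; omega
          have e1 : 21 - k = 0 := by omega
          have e2 : 21 - (k + 1) = 0 := by omega
          have e3 : 34 - k = 0 := by omega
          have e4 : 34 - (k + 1) = 0 := by omega
          have e5 : 29 - (k - 34) = (29 - ((k + 1) - 34)) + 1 := by omega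
          have e6 : 74 - k = (73 - k) + 1 := by omega
          have e7 : 74 - (k + 1) = 73 - k := by omega
          rw [hc, if_pos rfl]
          simp only [List.map_cons]
          rw [hk1, ih, e1, e2, e3, e4, e5, e6, e7, List.drop_zero, List.drop_zero,
            List.take_succ_cons, List.drop_succ_cons]
          simp
        · by_cases h4 : k < 74
          · have hc : (decide (¬ ((21 ≤ ((k:Int),a).1 ∧ ((k:Int),a).1 ≤ 33) ∨ (63 ≤ ((k:Int),a).1 ∧ ((k:Int),a).1 ≤ 73)))) = false := by
              simp; omega
            have e1 : 21 - k = 0 := by omega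
            have e2 : 21 - (k + 1) = 0 := by omega
            have e3 : 34 - k = 0 := by omega
            have e4 : 34 - (k + 1) = 0 := by omega
            have e5 : 29 - (k - 34) = 0 := by omega
            have e6 : 29 - ((k + 1) - 34) = 0 := by omega
            have e7 : 74 - k = (73 - k) + 1 := by omega
            have e8 : 74 - (k + 1) = 73 - k := by omega
            rw [hc, if_neg (by simp)]
            rw [hk1, ih, e2, e4, e6, e8, e1, e3, e5, e7, List.drop_succ_cons]
            simp
          · have hc : (decide (¬ ((21 ≤ ((k:Int),a).1 ∧ ((k:Int),a).1 ≤ 33) ∨ (63 ≤ ((k:Int),a).1 ∧ ((k:Int),a).1 ≤ 73)))) = true := by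
              simp; omega
            have e1 : 21 - k = 0 := by omega
            have e2 : 21 - (k + 1) = 0 := by omega
            have e3 : 34 - k = 0 := by omega
            have e4 : 34 - (k + 1) = 0 := by omega
            have e5 : 29 - (k - 34) = 0 := by omega
            have e6 : 29 - ((k + 1) - 34) = 0 := by omega
            have e7 : 74 - k = 0 := by omega
            have e8 : 74 - (k + 1) = 0 := by omega
            rw [hc, if_pos rfl]
            simp only [List.map_cons]
            rw [hk1, ih, e2, e4, e6, e8, e1, e3, e5, e7]
            simp

-- ===== VERDICT (by name: the statement is the Claim_ definition above) =====
theorem extract_non_anchor_text_spec : Claim_equal_extract_non_anchor_text := by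
  intro text _
  unfold Spec_extract_non_anchor_text
  unfold extract_non_anchor_text extract_non_anchor_text_alt
  have hm : ((PySem.List.sorted2 pvANCHORS.values (fun v => v.1) (fun v => v.2)).foldl
  (fun (m : List (Int × Int)) se =>
  match m.getLast? with
  | some last =>
  if se.1 ≤ last.2 then m.dropLast ++ [(last.1, max last.2 (se.2 + 1))]
  else m ++ [(se.1, se.2 + 1)]
  | none => m ++ [(se.1, se.2 + 1)]) [])
  = [(21, 34), (63, 74)] := by decide
  simp only [hm, List.foldl_cons, List.foldl_nil]
  rw [pvFold]
  simp only [pvLocked_contains, ← decide_not, List.nil_append]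
  have h0 : (0 : Int) = ((0 : Nat) : Int) := by norm_num
  rw [h0, pvCore]
  simp only [PySem.Chars.slice_eq_listSlice, PySem.Chars.join_nil_singletons]
  congr 1
  simp [PySem.List.slice_toNat, PySem.List.slice_from, PySem.Chars.join_cons_cons,
  PySem.Chars.join_singleton]
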